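-- pv_equiv track=rewrite | github.com/RadiumGu/graph-dependency-platform | dr-plan-generator/registry/rule_parser.py | _split_categories
-- ===== SOURCE A (Python) =====
-- from typing import Any, Dict, List, Optional
--
-- def _split_categories(text: str) -> Dict[str, List[str]]:
--     """Split rules text into categories (### headings) → list of rule strings."""
--     categories: Dict[str, List[str]] = {}
--     current_category = "general"
--     current_rules: List[str] = []
--
--     for line in text.split("\n"):
--         line = line.rstrip()
--         if line.startswith("### "):
--             if current_rules:
--                 categories[current_category] = current_rules
--             current_category = line[4:].strip()
--             current_rules = []
--         elif line.startswith("- "):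
--             current_rules.append(line[2:].strip())
--         elif line.startswith("  ") and current_rules:
--             # Continuation of previous rule
--             current_rules[-1] += " " + line.strip()
--
--     if current_rules:
--         categories[current_category] = current_rules
--
--     return categories
-- ===== SOURCE B (Python) =====
-- from typing import Dict, List
--
--
-- def _split_categories(text: str) -> Dict[str, List[str]]:
--     """Two-phase: partition lines into (heading, body) sections, then parse each body."""
--     # Phase 1: partition into sections.
--     sections = []
--     name = "general"
--     body: List[str] = []
--     for raw in text.split("\n"):
--         line = raw.rstrip()
--         if line.startswith("### "):
--             sections.append((name, body))
--             name = line[4:].strip()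
--             body = []
--         else:
--             body.append(line)
--     sections.append((name, body))
--
--     # Phase 2: parse each section's body into its rule list.
--     result: Dict[str, List[str]] = {}
--     for name, body in sections:
--         rules: List[str] = []
--         for line in body:
--             if line.startswith("- "):
--                 rules.append(line[2:].strip())
--             elif line.startswith("  ") and rules:
--                 rules[-1] += " " + line.strip()
--         if rules:
--             result[name] = rules
--     return result
-- ===== Notes on version B (the rewrite author's own statement) =====
-- stated objective: simpler
-- what changed: Replaces A's single stateful loop (dict + current category + current rules mutated together, with a trailing flush) by a two-phase decomposition: first partition lines into (heading, body) sections, then independently parse each section's body into rules and assign the non-empty ones.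
import Mathlib
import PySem

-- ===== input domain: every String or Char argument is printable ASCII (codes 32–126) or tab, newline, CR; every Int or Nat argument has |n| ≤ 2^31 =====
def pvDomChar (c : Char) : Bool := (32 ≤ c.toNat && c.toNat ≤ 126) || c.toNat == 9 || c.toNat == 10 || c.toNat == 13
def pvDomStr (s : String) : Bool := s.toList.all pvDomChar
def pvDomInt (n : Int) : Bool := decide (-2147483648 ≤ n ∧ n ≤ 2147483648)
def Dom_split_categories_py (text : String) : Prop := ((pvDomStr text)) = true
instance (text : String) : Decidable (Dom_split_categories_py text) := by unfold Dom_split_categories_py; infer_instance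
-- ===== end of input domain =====

-- B replaces A's single stateful loop by a two-phase partition-then-parse decomposition (same cost); equivalence proved on all inputs.


-- ===== PORT A =====
-- A's loop body: state = (categories dict, current_category, current_rules); strings handled as List Char (PySem.Chars).
def pyAStep (st : PySem.Dict String (List String) × List Char × List (List Char)) (raw : List Char) :
    PySem.Dict String (List String) × List Char × List (List Char) :=
  let line := PySem.Chars.rstrip raw
  if PySem.Chars.startswith line "### ".toList then
    ((if st.2.2 = [] then st.1 else st.1.insert (String.mk st.2.1) (st.2.2.map String.mk)),
     PySem.Chars.strip (PySem.Chars.slice line (some 4) none), [])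
  else if PySem.Chars.startswith line "- ".toList then
    (st.1, st.2.1, st.2.2 ++ [PySem.Chars.strip (PySem.Chars.slice line (some 2) none)])
  else if PySem.Chars.startswith line "  ".toList && !st.2.2.isEmpty then
    (st.1, st.2.1, st.2.2.dropLast ++ [(st.2.2.getLast?.getD []) ++ ' ' :: PySem.Chars.strip line])
  else st

def split_categories_py (text : String) : List (String × List String) :=
  let fin := (PySem.Chars.splitOn text.toList "\n".toList).foldl pyAStep
      (PySem.Dict.empty, "general".toList, [])
  (if fin.2.2 = [] then fin.1
   else fin.1.insert (String.mk fin.2.1) (fin.2.2.map String.mk)).items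

-- ===== PORT B =====
-- B phase 2 inner step: fold a body line into the rule list.
def pyBRule (rules : List (List Char)) (line : List Char) : List (List Char) :=
  if PySem.Chars.startswith line "- ".toList then
    rules ++ [PySem.Chars.strip (PySem.Chars.slice line (some 2) none)]
  else if PySem.Chars.startswith line "  ".toList && !rules.isEmpty then
    rules.dropLast ++ [(rules.getLast?.getD []) ++ ' ' :: PySem.Chars.strip line]
  else rules

-- B phase 1 step: partition lines into sections; state = (finished sections, current name, current body).
def pyBPartStep (st : List (List Char × List (List Char)) × List Char × List (List Char))
    (raw : List Char) : List (List Char × List (List Char)) × List Char × List (List Char) :=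
  let line := PySem.Chars.rstrip raw
  if PySem.Chars.startswith line "### ".toList then
    (st.1 ++ [(st.2.1, st.2.2)], PySem.Chars.strip (PySem.Chars.slice line (some 4) none), [])
  else (st.1, st.2.1, st.2.2 ++ [line])

def pyBParse (body : List (List Char)) : List (List Char) := body.foldl pyBRule []

-- B phase 2 outer step: parse a section and assign it when non-empty.
def pyBAssign (d : PySem.Dict String (List String)) (sec : List Char × List (List Char)) :
    PySem.Dict String (List String) :=
  let rules := pyBParse sec.2
  if rules = [] then d else d.insert (String.mk sec.1) (rules.map String.mk)

def split_categories_py_alt (text : String) : List (String × List String) :=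
  let p := (PySem.Chars.splitOn text.toList "\n".toList).foldl pyBPartStep
      ([], "general".toList, [])
  let sections := p.1 ++ [(p.2.1, p.2.2)]
  (sections.foldl pyBAssign PySem.Dict.empty).items

-- ===== PRECONDITION & SPEC =====
def Spec_split_categories_py (text : String) (out : List (String × List String)) : Prop := out = split_categories_py_alt text
instance (text : String) (out : List (String × List String)) : Decidable (Spec_split_categories_py text out) := by unfold Spec_split_categories_py; infer_instance

-- ===== CLAIM (what is proved, stated in full; the proofs are below) =====
def Claim_equal_split_categories_py : Prop := ∀ (text : String), Dom_split_categories_py text → Spec_split_categories_py text (split_categories_py text)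

-- ===== LEMMAS AND PROOFS =====

-- A's final flush, as a function of the loop state.
def pvFinishA (st : PySem.Dict String (List String) × List Char × List (List Char)) :
    PySem.Dict String (List String) :=
  if st.2.2 = [] then st.1 else st.1.insert (String.mk st.2.1) (st.2.2.map String.mk)

-- Common middle form: the list of (name, PARSED rules) sections, first section seeded with `rules`.
def pvSecs : List (List Char) → List Char → List (List Char) → List (List Char × List (List Char))
  | [], name, rules => [(name, rules)]
  | raw :: rest, name, rules =>
    if PySem.Chars.startswith (PySem.Chars.rstrip raw) "### ".toList then
      (name, rules) ::
        pvSecs rest (PySem.Chars.strip (PySem.Chars.slice (PySem.Chars.rstrip raw) (some 4) none)) []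
    else pvSecs rest name (pyBRule rules (PySem.Chars.rstrip raw))

-- Raw sections (bodies unparsed), as B's phase 1 produces them.
def pvRawSecs : List (List Char) → List Char → List (List Char) → List (List Char × List (List Char))
  | [], name, body => [(name, body)]
  | raw :: rest, name, body =>
    if PySem.Chars.startswith (PySem.Chars.rstrip raw) "### ".toList then
      (name, body) ::
        pvRawSecs rest (PySem.Chars.strip (PySem.Chars.slice (PySem.Chars.rstrip raw) (some 4) none)) []
    else pvRawSecs rest name (body ++ [PySem.Chars.rstrip raw])

-- Assign a list of parsed sections into a dict, non-empty ones only.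
def pvAssign (cats : PySem.Dict String (List String))
    (ss : List (List Char × List (List Char))) : PySem.Dict String (List String) :=
  ss.foldl (fun d s => if s.2 = [] then d else d.insert (String.mk s.1) (s.2.map String.mk)) cats

theorem pvSecs_cons (raw : List Char) (rest : List (List Char)) (name : List Char)
    (rules : List (List Char)) :
    pvSecs (raw :: rest) name rules =
      if PySem.Chars.startswith (PySem.Chars.rstrip raw) "### ".toList = true then
        (name, rules) ::
          pvSecs rest (PySem.Chars.strip (PySem.Chars.slice (PySem.Chars.rstrip raw) (some 4) none)) []
      else pvSecs rest name (pyBRule rules (PySem.Chars.rstrip raw)) := rfl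

theorem pvRawSecs_cons (raw : List Char) (rest : List (List Char)) (name : List Char)
    (body : List (List Char)) :
    pvRawSecs (raw :: rest) name body =
      if PySem.Chars.startswith (PySem.Chars.rstrip raw) "### ".toList = true then
        (name, body) ::
          pvRawSecs rest (PySem.Chars.strip (PySem.Chars.slice (PySem.Chars.rstrip raw) (some 4) none)) []
      else pvRawSecs rest name (body ++ [PySem.Chars.rstrip raw]) := rfl

theorem pyAStep_heading (cats : PySem.Dict String (List String)) (name : List Char)
    (rules : List (List Char)) (raw : List Char)
    (h : PySem.Chars.startswith (PySem.Chars.rstrip raw) "### ".toList = true) :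
    pyAStep (cats, name, rules) raw =
      ((if rules = [] then cats else cats.insert (String.mk name) (rules.map String.mk)),
        PySem.Chars.strip (PySem.Chars.slice (PySem.Chars.rstrip raw) (some 4) none), []) := by
  simp only [pyAStep]
  rw [if_pos h]

theorem pyAStep_nonheading (cats : PySem.Dict String (List String)) (name : List Char)
    (rules : List (List Char)) (raw : List Char)
    (h : ¬ PySem.Chars.startswith (PySem.Chars.rstrip raw) "### ".toList = true) :
    pyAStep (cats, name, rules) raw = (cats, name, pyBRule rules (PySem.Chars.rstrip raw)) := by
  simp only [pyAStep, pyBRule]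
  rw [if_neg h]
  split_ifs <;> rfl

theorem keyA (lines : List (List Char)) :
    ∀ (cats : PySem.Dict String (List String)) (name : List Char) (rules : List (List Char)),
    pvFinishA (lines.foldl pyAStep (cats, name, rules)) = pvAssign cats (pvSecs lines name rules) := by
  induction lines with
  | nil => intro cats name rules; rfl
  | cons raw rest ih =>
    intro cats name rules
    by_cases h : PySem.Chars.startswith (PySem.Chars.rstrip raw) "### ".toList = true
    · rw [List.foldl_cons, pyAStep_heading cats name rules raw h, ih, pvSecs_cons, if_pos h]
      rfl
    · rw [List.foldl_cons, pyAStep_nonheading cats name rules raw h, ih, pvSecs_cons, if_neg h]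

theorem pyBPartStep_heading (acc : List (List Char × List (List Char))) (name : List Char)
    (body : List (List Char)) (raw : List Char)
    (h : PySem.Chars.startswith (PySem.Chars.rstrip raw) "### ".toList = true) :
    pyBPartStep (acc, name, body) raw =
      (acc ++ [(name, body)],
        PySem.Chars.strip (PySem.Chars.slice (PySem.Chars.rstrip raw) (some 4) none), []) := by
  simp only [pyBPartStep]
  rw [if_pos h]

theorem pyBPartStep_nonheading (acc : List (List Char × List (List Char))) (name : List Char)
    (body : List (List Char)) (raw : List Char)
    (h : ¬ PySem.Chars.startswith (PySem.Chars.rstrip raw) "### ".toList = true) :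
    pyBPartStep (acc, name, body) raw = (acc, name, body ++ [PySem.Chars.rstrip raw]) := by
  simp only [pyBPartStep]
  rw [if_neg h]

theorem partB (lines : List (List Char)) :
    ∀ (acc : List (List Char × List (List Char))) (name : List Char) (body : List (List Char)),
    (lines.foldl pyBPartStep (acc, name, body)).1 ++
      [((lines.foldl pyBPartStep (acc, name, body)).2.1,
        (lines.foldl pyBPartStep (acc, name, body)).2.2)]
      = acc ++ pvRawSecs lines name body := by
  induction lines with
  | nil => intro acc name body; rfl
  | cons raw rest ih =>
    intro acc name body
    by_cases h : PySem.Chars.startswith (PySem.Chars.rstrip raw) "### ".toList = true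
    · rw [List.foldl_cons, pyBPartStep_heading acc name body raw h, ih, pvRawSecs_cons, if_pos h,
        List.append_assoc]
      rfl
    · rw [List.foldl_cons, pyBPartStep_nonheading acc name body raw h, ih, pvRawSecs_cons, if_neg h]

theorem parse_snoc (body : List (List Char)) (line : List Char) :
    pyBParse (body ++ [line]) = pyBRule (pyBParse body) line := by
  unfold pyBParse
  rw [List.foldl_append]
  rfl

theorem raw_to_parsed (lines : List (List Char)) :
    ∀ (name : List Char) (body : List (List Char)),
    (pvRawSecs lines name body).map (fun s => (s.1, pyBParse s.2))
      = pvSecs lines name (pyBParse body) := by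
  induction lines with
  | nil => intro name body; rfl
  | cons raw rest ih =>
    intro name body
    by_cases h : PySem.Chars.startswith (PySem.Chars.rstrip raw) "### ".toList = true
    · rw [pvRawSecs_cons, if_pos h, List.map_cons, ih, pvSecs_cons, if_pos h]
      rfl
    · rw [pvRawSecs_cons, if_neg h, ih, parse_snoc, pvSecs_cons, if_neg h]

theorem assign_eq_foldl (ss : List (List Char × List (List Char)))
    (cats : PySem.Dict String (List String)) :
    ss.foldl pyBAssign cats = pvAssign cats (ss.map (fun s => (s.1, pyBParse s.2))) := by
  unfold pvAssign
  rw [List.foldl_map]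
  rfl

-- ===== VERDICT (by name: the statement is the Claim_ definition above) =====
theorem split_categories_py_spec : Claim_equal_split_categories_py := by
  intro text _
  unfold Spec_split_categories_py
  have hA : split_categories_py text
      = (pvAssign PySem.Dict.empty
          (pvSecs (PySem.Chars.splitOn text.toList "\n".toList) "general".toList [])).items := by
    show (pvFinishA ((PySem.Chars.splitOn text.toList "\n".toList).foldl pyAStep
        (PySem.Dict.empty, "general".toList, []))).items = _
    rw [keyA]
  have hB : split_categories_py_alt text
      = (pvAssign PySem.Dict.empty
          (pvSecs (PySem.Chars.splitOn text.toList "\n".toList) "general".toList [])).items := by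
    show ((((PySem.Chars.splitOn text.toList "\n".toList).foldl pyBPartStep
          ([], "general".toList, [])).1 ++
        [(((PySem.Chars.splitOn text.toList "\n".toList).foldl pyBPartStep
            ([], "general".toList, [])).2.1,
          ((PySem.Chars.splitOn text.toList "\n".toList).foldl pyBPartStep
            ([], "general".toList, [])).2.2)]).foldl pyBAssign PySem.Dict.empty).items = _
    rw [partB, List.nil_append, assign_eq_foldl, raw_to_parsed]
    rfl
  rw [hA, hB]
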